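-- pv_equiv track=rewrite | github.com/AmericoGarciaG/ZL_Crisalida | src/affinity_logic.py | calculate_affinities_for_combo
-- ===== SOURCE A (Python) =====
-- from collections import Counter
-- from itertools import combinations
-- from typing import List, Dict, Tuple
--
-- def calculate_affinities_for_combo(
--     combination: List[int],
--     freq_counters: Dict[int, Counter]
-- ) -> Dict[int, int]:
--     """
--     Calcula las afinidades de diferentes niveles para una única combinación.
--
--     Args:
--         combination: La combinación a evaluar (lista de 6 enteros).
--         freq_counters: El diccionario de frecuencias pre-calculado por calculate_frequencies.
--
--     Returns:
--         Un diccionario donde la clave es el nivel y el valor es la afinidad calculada.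
--     """
--     sorted_combo = sorted(combination)
--     affinities: Dict[int, int] = {}
--     for level, counter in freq_counters.items():
--         total_affinity = 0
--         if len(sorted_combo) >= level:
--             for sub in combinations(sorted_combo, level):
--                 total_affinity += counter.get(sub, 0)
--         affinities[level] = total_affinity
--     return affinities
-- ===== SOURCE B (Python) =====
-- def _powerset(xs):
--     # all subsequences of xs (as tuples, order preserved), head excluded then included
--     if not xs:
--         return [()]
--     rest = _powerset(xs[1:])
--     return rest + [(xs[0],) + s for s in rest]
--
--
-- def calculate_affinities_for_combo(combination, freq_counters):
--     sorted_combo = sorted(combination)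
--     totals = {}
--     for sub in _powerset(sorted_combo):
--         lvl = len(sub)
--         if lvl in freq_counters:
--             totals[lvl] = totals.get(lvl, 0) + freq_counters[lvl].get(sub, 0)
--     return {level: totals.get(level, 0) for level in freq_counters}
-- ===== Notes on version B (the rewrite author's own statement) =====
-- stated objective: alternative
-- what changed: Replaces the per-level passes that each re-enumerate combinations(sorted_combo, level) by a single enumeration of the powerset of the sorted combination, dispatching each subset by its length into a tally dict, and then reading the result off per level.
import Mathlib
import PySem

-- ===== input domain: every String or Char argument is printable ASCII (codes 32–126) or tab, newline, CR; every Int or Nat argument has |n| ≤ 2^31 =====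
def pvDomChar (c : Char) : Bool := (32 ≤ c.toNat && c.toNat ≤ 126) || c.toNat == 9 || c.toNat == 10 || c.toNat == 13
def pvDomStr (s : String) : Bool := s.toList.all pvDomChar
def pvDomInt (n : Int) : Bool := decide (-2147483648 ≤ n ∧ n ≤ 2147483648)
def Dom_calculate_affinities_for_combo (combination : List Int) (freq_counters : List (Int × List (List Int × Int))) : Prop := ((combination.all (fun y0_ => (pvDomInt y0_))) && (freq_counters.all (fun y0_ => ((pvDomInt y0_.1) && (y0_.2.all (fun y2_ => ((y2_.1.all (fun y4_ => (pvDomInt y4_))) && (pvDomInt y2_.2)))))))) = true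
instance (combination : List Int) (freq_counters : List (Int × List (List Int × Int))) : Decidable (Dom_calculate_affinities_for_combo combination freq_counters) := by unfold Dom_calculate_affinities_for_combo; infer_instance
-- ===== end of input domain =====

-- B replaces A's per-level combination passes by one pass over the powerset of the
-- sorted combination, dispatching each subset by its length (objective: alternative).

-- ===== PORT A =====
-- itertools.combinations(xs, r): all length-r subsequences of xs, in itertools' order
def pyCombos : Nat → List Int → List (List Int)
  | 0, _ => [[]]
  | _ + 1, [] => []
  | r + 1, x :: xs => (pyCombos r xs).map (fun s => x :: s) ++ pyCombos (r + 1) xs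

def calculate_affinities_for_combo (combination : List Int) (freq_counters : List (Int × List (List Int × Int))) : List (Int × Int) :=
  let sorted_combo := PySem.List.sorted combination (fun x => x) false
  (freq_counters.foldl (fun (affinities : PySem.Dict Int Int) lc =>
      affinities.insert lc.1
        (if (sorted_combo.length : Int) ≥ lc.1 then
          (pyCombos lc.1.toNat sorted_combo).foldl
            (fun total_affinity sub => total_affinity + (PySem.Dict.mk lc.2).getD sub 0) 0
         else 0))
    PySem.Dict.empty).items

-- ===== PORT B =====
-- _powerset(xs): subsequences of xs, head excluded then included (tuples keep order)
def pvPowerset : List Int → List (List Int)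
  | [] => [[]]
  | x :: xs => pvPowerset xs ++ (pvPowerset xs).map (fun s => x :: s)

def calculate_affinities_for_combo_alt (combination : List Int) (freq_counters : List (Int × List (List Int × Int))) : List (Int × Int) :=
  let sorted_combo := PySem.List.sorted combination (fun x => x) false
  -- 'if lvl in freq_counters: totals[lvl] = totals.get(lvl,0) + freq_counters[lvl].get(sub, 0)'
  -- ported as a match on the dict lookup (some = key present)
  let totals : PySem.Dict Int Int :=
    (pvPowerset sorted_combo).foldl (fun totals sub =>
      match (PySem.Dict.mk freq_counters).get? (sub.length : Int) with
      | some c => totals.modify (sub.length : Int) 0 (fun v => v + (PySem.Dict.mk c).getD sub 0)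
      | none => totals) PySem.Dict.empty
  (freq_counters.foldl (fun (d : PySem.Dict Int Int) lc => d.insert lc.1 (totals.getD lc.1 0)) PySem.Dict.empty).items

-- ===== PRECONDITION & SPEC =====
-- Pre_ excludes freq_counters with a negative level, on which Python A raises ValueError
-- (combinations with negative r), and duplicate level keys, which cannot arise from a
-- Python dict argument (the assoc list models a dict).
def Pre_calculate_affinities_for_combo (combination : List Int) (freq_counters : List (Int × List (List Int × Int))) : Prop :=
  (∀ p ∈ freq_counters, 0 ≤ p.1) ∧ (freq_counters.map Prod.fst).Nodup
instance (combination : List Int) (freq_counters : List (Int × List (List Int × Int))) : Decidable (Pre_calculate_affinities_for_combo combination freq_counters) := by unfold Pre_calculate_affinities_for_combo; infer_instance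

def pvWitness_calculate_affinities_for_combo : List Int × (List (Int × List (List Int × Int))) :=
  ([1, 2], [(1, [([1], 2), ([2], 3)]), (2, [([1, 2], 5)])])

def Spec_calculate_affinities_for_combo (combination : List Int) (freq_counters : List (Int × List (List Int × Int))) (out : List (Int × Int)) : Prop := out = calculate_affinities_for_combo_alt combination freq_counters
instance (combination : List Int) (freq_counters : List (Int × List (List Int × Int))) (out : List (Int × Int)) : Decidable (Spec_calculate_affinities_for_combo combination freq_counters out) := by unfold Spec_calculate_affinities_for_combo; infer_instance

-- ===== CLAIM (what is proved, stated in full; the proofs are below) =====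
def Claim_equal_calculate_affinities_for_combo : Prop := ∀ (combination : List Int) (freq_counters : List (Int × List (List Int × Int))), Dom_calculate_affinities_for_combo combination freq_counters → Pre_calculate_affinities_for_combo combination freq_counters → Spec_calculate_affinities_for_combo combination freq_counters (calculate_affinities_for_combo combination freq_counters)


-- ===== LEMMAS AND PROOFS =====

lemma pyCombos_nil_of_lt : ∀ (xs : List Int) (m : Nat), xs.length < m → pyCombos m xs = [] := by
  intro xs
  induction xs with
  | nil =>
    intro m hm
    match m, hm with
    | m + 1, _ => rfl
  | cons x xs ih =>
    intro m hm
    match m, hm with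
    | m + 1, hm =>
      have h1 : xs.length < m := by simpa using hm
      have h2 : xs.length < m + 1 := Nat.lt_succ_of_lt h1
      simp [pyCombos, ih m h1, ih (m + 1) h2]

lemma powersum : ∀ (xs : List Int) (m : Nat) (f : List Int → Int),
    ((pvPowerset xs).map (fun s => if s.length = m then f s else 0)).sum
      = ((pyCombos m xs).map f).sum := by
  intro xs
  induction xs with
  | nil =>
    intro m f
    cases m with
    | zero => simp [pvPowerset, pyCombos]
    | succ m => simp [pvPowerset, pyCombos]
  | cons x xs ih =>
    intro m f
    cases m with
    | zero =>
      simp only [pvPowerset, pyCombos, List.map_append, List.sum_append, List.map_map]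
      have h2 : ((pvPowerset xs).map ((fun s => if s.length = 0 then f s else 0) ∘ fun s => x :: s)).sum = 0 := by
        apply List.sum_eq_zero; intro y hy
        simp only [List.mem_map] at hy
        obtain ⟨s, _, rfl⟩ := hy
        simp
      rw [h2, ih 0 f]
      simp [pyCombos]
    | succ m =>
      simp only [pvPowerset, pyCombos, List.map_append, List.sum_append, List.map_map]
      have h1 : ((pvPowerset xs).map ((fun s => if s.length = m + 1 then f s else 0) ∘ fun s => x :: s)).sum
          = ((pvPowerset xs).map (fun s => if s.length = m then f (x :: s) else 0)).sum := by
        congr 1; apply List.map_congr_left; intro s _; simp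
      rw [h1, ih m (fun s => f (x :: s)), ih (m + 1) f]
      simp only [Function.comp_def]
      omega

lemma items_insert_loop (fc : List (Int × List (List Int × Int))) (v : Int × List (List Int × Int) → Int)
    (h : (fc.map Prod.fst).Nodup) :
    (fc.foldl (fun d lc => d.insert lc.1 (v lc)) PySem.Dict.empty).items
      = fc.map (fun lc => (lc.1, v lc)) := by
  have := PySem.Dict.items_foldl_insert_fresh fc (fun lc => lc.1) v PySem.Dict.empty
    (fun a _ => PySem.Dict.contains_empty _) (by simpa using h)
  simpa [PySem.Dict.empty, PySem.Dict.items] using this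

lemma totals_getD (fc : List (Int × List (List Int × Int))) (l : Int) :
    ∀ (ss : List (List Int)) (t : PySem.Dict Int Int),
      (ss.foldl (fun totals sub =>
          match (PySem.Dict.mk fc).get? (sub.length : Int) with
          | some c => totals.modify (sub.length : Int) 0 (fun v => v + (PySem.Dict.mk c).getD sub 0)
          | none => totals) t).getD l 0
        = t.getD l 0 + (ss.map (fun s => if (s.length : Int) = l then
            (match (PySem.Dict.mk fc).get? l with
             | some c => (PySem.Dict.mk c).getD s 0
             | none => 0) else 0)).sum := by
  intro ss
  induction ss with
  | nil => intro t; simp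
  | cons s ss ih =>
    intro t
    rw [List.foldl_cons, List.map_cons, List.sum_cons]
    by_cases hl : ((s.length : Nat) : Int) = l
    · subst hl
      rcases hget : (PySem.Dict.mk fc).get? ((s.length : Nat) : Int) with _ | c
      · simp only [ih]
        simp [hget]
      · simp only [ih, PySem.Dict.getD_modify]
        simp [hget]
        ring
    · rcases hget : (PySem.Dict.mk fc).get? ((s.length : Nat) : Int) with _ | c
      · simp only [ih]
        simp [hl]
      · simp only [ih, PySem.Dict.getD_modify]
        have hne : ¬ (l = ((s.length : Nat) : Int)) := fun h => hl h.symm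
        simp [hne, hl]

lemma mk_get?_of_mem (fc : List (Int × List (List Int × Int))) (lc : Int × List (List Int × Int))
    (hmem : lc ∈ fc) (hnd : (fc.map Prod.fst).Nodup) :
    (PySem.Dict.mk fc).get? lc.1 = some lc.2 := by
  apply PySem.Dict.get?_of_mem_items (d := PySem.Dict.mk fc) (k := lc.1) (v := lc.2)
  · simpa [PySem.Dict.items] using hmem
  · simpa [PySem.Dict.keys, PySem.Dict.items] using hnd

-- ===== VERDICT (by name: the statement is the Claim_ definition above) =====
theorem calculate_affinities_for_combo_spec : Claim_equal_calculate_affinities_for_combo := by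
  intro combination fc _hdom hpre
  obtain ⟨h0, hnd⟩ := hpre
  unfold Spec_calculate_affinities_for_combo
  unfold calculate_affinities_for_combo calculate_affinities_for_combo_alt
  simp only []
  set xs := PySem.List.sorted combination (fun x => x) false with hxs
  rw [items_insert_loop fc _ hnd, items_insert_loop fc _ hnd]
  apply List.map_congr_left
  intro lc hmem
  have hl0 : 0 ≤ lc.1 := h0 _ hmem
  have hget := mk_get?_of_mem fc lc hmem hnd
  refine Prod.ext rfl ?_
  simp only
  rw [totals_getD fc lc.1 (pvPowerset xs) PySem.Dict.empty, PySem.Dict.getD_empty, zero_add]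
  rw [PySem.List.foldl_add, zero_add]
  have hmapeq : ((pvPowerset xs).map (fun s => if (s.length : Int) = lc.1 then
      (match (PySem.Dict.mk fc).get? lc.1 with
       | some c => (PySem.Dict.mk c).getD s 0
       | none => 0) else 0))
      = ((pvPowerset xs).map (fun s => if s.length = lc.1.toNat then (PySem.Dict.mk lc.2).getD s 0 else 0)) := by
    apply List.map_congr_left
    intro s _
    simp only [hget]
    by_cases hcond : (s.length : Int) = lc.1
    · have h2 : s.length = lc.1.toNat := by omega
      simp [h2]
      intro hneg
      exact absurd hl0 (by omega)
    · have h2 : ¬ (s.length = lc.1.toNat) := by omega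
      simp [hcond, h2]
  rw [hmapeq, powersum xs lc.1.toNat (fun s => (PySem.Dict.mk lc.2).getD s 0)]
  by_cases hg : (xs.length : Int) ≥ lc.1
  · simp [hg]
  · have : xs.length < lc.1.toNat := by omega
    rw [pyCombos_nil_of_lt xs lc.1.toNat this]
    simp [hg]
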